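-- pv_equiv track=rewrite | github.com/cooijmanstim/my3yearold | holster.py | subalternatives
-- ===== SOURCE A (Python) =====
-- def subalternative(key, alt):
--   """Leftover of constraint `alt` after selecting `key`.
--
--   Mainly used in Narrow, where a key may select a subtree of the non-narrowed Holster and needs
--   further narrowing. For example, if `h = H(a=H(b=3, c=5))` then `h.Narrow("a.b").a` should select
--   the narrowed subtree `HolsterSubtree(h, "a").Narrow("b")`. In this case, `subalternative("a",
--   "a.b") == "b"`, as `b` is the yet unenforced part of the narrowing constraint `a.b` after
--   selecting `a`.
--
--   Also used by `insubtree`, which requires that there is no leftover, i.e. `key` is fully underneath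
--   `alt`.
--
--   Returns:
--     If `key` is a prefix of `alt`, returns `alt` with the prefix `key` removed. If `alt` is a prefix
--     of `key`, returns the empty string (meaning no constraints left to enforce).
--   Raises:
--     KeyError if `key` and `alt` do not share a prefix (i.e. `key` violates `alt`).
--   """
--   assert " " not in key
--   assert " " not in alt
--   keyparts, altparts = key.split("."), alt.split(".")
--   while keyparts and altparts:
--     a, b = keyparts.pop(0), altparts.pop(0)
--     if a != b:
--       raise KeyError()
--   return ".".join(altparts)
--
-- def subalternatives(key, alts):
--   """Leftovers of constraints in `alts` after selecting `key`.
--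
--   This is like `subalternative`, but `alts` is a composite key that represents the union of multiple
--   keys.
--
--   Mainly used in Narrow, where a key may select a subtree of the non-narrowed Holster and needs
--   further narrowing. For example, if `h = H(a=H(b=3, c=5))` then `h.Narrow("a.b").a` should select
--   the narrowed subtree `HolsterSubtree(h, "a").Narrow("b")`. In this case, `subalternative("a",
--   "a.b") == "b"`, as `b` is the yet unenforced part of the narrowing constraint `a.b` after
--   selecting `a`.
--
--   Also used by `insubforest`, which requires that there is no leftover, i.e. `key` is fully
--   underneath at least one of `alts`.
--
--   Returns:
--     A composite key disjoining the leftover constraints.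
--   Raises:
--     KeyError if `key` violates all of `alts`.
--   """
--   assert " " not in key
--   subalts = []
--   for alt in alts.split(" "):
--     try:
--       subalt = subalternative(key, alt)
--     except KeyError:
--       continue
--     subalts.append(subalt)
--   if not subalts:
--     raise KeyError()
--   return " ".join(subalt for subalt in subalts if subalt)
-- ===== SOURCE B (Python) =====
-- def _leftover(key, alt):
--   """Leftover of `alt` after selecting `key`, or None where key violates alt.
--
--   Works on the whole strings via dot-boundary prefix tests instead of
--   splitting into parts."""
--   if key == alt:
--     return ""
--   if alt.startswith(key + "."):
--     return alt[len(key) + 1:]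
--   if key.startswith(alt + "."):
--     return ""
--   return None
--
-- def subalternatives(key, alts):
--   assert " " not in key
--   subalts = [r for r in (_leftover(key, alt) for alt in alts.split(" ")) if r is not None]
--   if not subalts:
--     raise KeyError()
--   return " ".join(s for s in subalts if s)
-- ===== Notes on version B (the rewrite author's own statement) =====
-- stated objective: idiomatic
-- what changed: The per-alternative leftover is computed by whole-string dot-boundary prefix tests (key==alt / alt.startswith(key+'.') / key.startswith(alt+'.')) instead of splitting both keys into dot-parts and popping them pairwise in a while loop, and the collection loop becomes a comprehension over a None-returning helper instead of try/except around a raising helper.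
import Mathlib
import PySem

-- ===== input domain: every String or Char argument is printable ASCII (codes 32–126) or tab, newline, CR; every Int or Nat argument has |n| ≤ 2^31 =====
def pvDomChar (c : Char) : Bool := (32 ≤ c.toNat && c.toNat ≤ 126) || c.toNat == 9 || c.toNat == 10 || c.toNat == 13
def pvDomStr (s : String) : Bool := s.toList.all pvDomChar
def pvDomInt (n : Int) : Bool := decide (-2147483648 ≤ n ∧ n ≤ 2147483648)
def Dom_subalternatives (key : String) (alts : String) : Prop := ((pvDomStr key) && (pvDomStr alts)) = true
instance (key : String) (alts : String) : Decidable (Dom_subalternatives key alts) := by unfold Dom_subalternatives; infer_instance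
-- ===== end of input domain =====

-- B replaces A's pop-the-dot-parts while loop by whole-string dot-boundary prefix
-- tests and its try/except collection loop by a comprehension over a None-returning
-- helper (objective: idiomatic; same cost).


-- ===== PORT A =====
-- `subalternative`'s while loop: pop the heads of both part lists while both are
-- nonempty; a mismatch is the KeyError (`none`); at the end `".".join(altparts)`.
def subalternativeGo : List (List Char) → List (List Char) → Option (List Char)
  | [], altparts => some (PySem.Chars.join ['.'] altparts)
  | _ :: _, [] => some (PySem.Chars.join ['.'] [])
  | a :: keyparts, b :: altparts =>
    if a = b then subalternativeGo keyparts altparts else none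

-- subalternative(key, alt); `none` is the raised KeyError
def subalternativeA (key alt : List Char) : Option (List Char) :=
  subalternativeGo (PySem.Chars.splitOn key ['.']) (PySem.Chars.splitOn alt ['.'])

-- subalternatives(key, alts). The `assert " " not in key` and the `raise KeyError()`
-- return no value; Pre_subalternatives excludes exactly those inputs, the port
-- returns "" on the raise branch.
-- the for-loop of subalternatives: try/except KeyError → continue, else append
def collectA (key : List Char) (acc : List (List Char)) : List (List Char) → List (List Char)
  | [] => acc
  | alt :: rest => match subalternativeA key alt with
    | none => collectA key acc rest
    | some s => collectA key (acc ++ [s]) rest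

def subalternatives (key : String) (alts : String) : String :=
  let subalts := collectA key.toList [] (PySem.Chars.splitOn alts.toList [' '])
  if subalts = [] then ""
  else String.ofList (PySem.Chars.join [' '] (subalts.filter (fun s => !s.isEmpty)))

-- ===== PORT B =====
-- _leftover(key, alt): whole-string dot-boundary prefix tests; `none` = None.
-- `alt[len(key)+1:]` has a nonnegative start, so the slice is `List.drop`.
def leftoverB (key alt : List Char) : Option (List Char) :=
  if key = alt then some []
  else if PySem.Chars.startswith alt (key ++ ['.']) then some (alt.drop (key.length + 1))
  else if PySem.Chars.startswith key (alt ++ ['.']) then some []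
  else none

-- subalternatives(key, alts) of Source B; the comprehension over the generator is filterMap;
-- assert/raise are excluded by Pre_subalternatives, "" on the raise branch as in port A.
def subalternatives_alt (key : String) (alts : String) : String :=
  let subalts := (PySem.Chars.splitOn alts.toList [' ']).filterMap (leftoverB key.toList)
  if subalts = [] then ""
  else String.ofList (PySem.Chars.join [' '] (subalts.filter (fun s => !s.isEmpty)))

-- ===== PRECONDITION & SPEC =====
-- Pre_ excludes exactly the inputs where the Python A raises: a key containing " "
-- (AssertionError), and key violating every alternative (KeyError).
def Pre_subalternatives (key : String) (alts : String) : Prop :=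
  ' ' ∉ key.toList ∧
  ∃ alt ∈ PySem.Chars.splitOn alts.toList [' '],
    key.toList = alt ∨ PySem.Chars.startswith alt (key.toList ++ ['.']) = true ∨
      PySem.Chars.startswith key.toList (alt ++ ['.']) = true
instance (key : String) (alts : String) : Decidable (Pre_subalternatives key alts) := by
  unfold Pre_subalternatives; infer_instance
def pvWitness_subalternatives : String × String := ("a", "a.b b")

def Spec_subalternatives (key : String) (alts : String) (out : String) : Prop := out = subalternatives_alt key alts
instance (key : String) (alts : String) (out : String) : Decidable (Spec_subalternatives key alts out) := by unfold Spec_subalternatives; infer_instance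

-- ===== CLAIM (what is proved, stated in full; the proofs are below) =====
def Claim_equal_subalternatives : Prop := ∀ (key : String) (alts : String), Dom_subalternatives key alts → Pre_subalternatives key alts → Spec_subalternatives key alts (subalternatives key alts)

-- ===== LEMMAS AND PROOFS =====

-- a structural recursion computing `s.split(".")`, used only in the proofs
def pySplit : List Char → List (List Char)
  | [] => [[]]
  | c :: cs => if c = '.' then [] :: pySplit cs else (pySplit cs).modifyHead (c :: ·)

theorem pySplit_ne_nil (s : List Char) : pySplit s ≠ [] := by
  induction s with
  | nil => simp [pySplit]
  | cons c cs ih =>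
    simp only [pySplit]
    split
    · simp
    · cases h : pySplit cs with
      | nil => exact absurd h ih
      | cons a t => simp [List.modifyHead]

theorem splitOn_go_eq (fuel : Nat) : ∀ (l cur : List Char) (accs : List (List Char)),
    l.length < fuel →
    PySem.Chars.splitOn.go ['.'] fuel l cur accs = accs.reverse ++ (pySplit l).modifyHead (cur.reverse ++ ·) := by
  induction fuel with
  | zero => intro l cur accs h; exact absurd h (Nat.not_lt_zero _)
  | succ f ih =>
    intro l cur accs h
    cases l with
    | nil => simp [PySem.Chars.splitOn.go, pySplit]
    | cons c rest =>
      by_cases hc : c = '.'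
      · subst hc
        rw [show PySem.Chars.splitOn.go ['.'] (f+1) ('.' :: rest) cur accs
              = PySem.Chars.splitOn.go ['.'] f rest [] (cur.reverse :: accs) by
            simp [PySem.Chars.splitOn.go, List.isPrefixOf]]
        rw [ih rest [] (cur.reverse :: accs) (by simpa using Nat.lt_of_succ_lt_succ h)]
        cases hps : pySplit rest with
        | nil => exact absurd hps (pySplit_ne_nil rest)
        | cons a t => simp [pySplit, hps, List.modifyHead]
      · rw [show PySem.Chars.splitOn.go ['.'] (f+1) (c :: rest) cur accs
              = PySem.Chars.splitOn.go ['.'] f rest (c :: cur) accs by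
            simp only [PySem.Chars.splitOn.go, List.isPrefixOf, Bool.and_true]
            simp [Ne.symm hc]]
        rw [ih rest (c :: cur) accs (by simpa using Nat.lt_of_succ_lt_succ h)]
        cases hps : pySplit rest with
        | nil => exact absurd hps (pySplit_ne_nil rest)
        | cons a t => simp [pySplit, hps, hc, List.modifyHead]

theorem splitOn_eq (s : List Char) : PySem.Chars.splitOn s ['.'] = pySplit s := by
  rw [PySem.Chars.splitOn, splitOn_go_eq (s.length + 1) s [] [] (by omega)]
  cases hps : pySplit s with
  | nil => exact absurd hps (pySplit_ne_nil s)
  | cons a t => simp [List.modifyHead]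

theorem join_pySplit (s : List Char) : PySem.Chars.join ['.'] (pySplit s) = s := by
  induction s with
  | nil => simp [pySplit, PySem.Chars.join_singleton]
  | cons c cs ih =>
    simp only [pySplit]
    split
    · cases hps : pySplit cs with
      | nil => exact absurd hps (pySplit_ne_nil cs)
      | cons a t =>
        rw [hps] at ih
        simp_all [PySem.Chars.join_cons_cons]
    · cases hps : pySplit cs with
      | nil => exact absurd hps (pySplit_ne_nil cs)
      | cons a t =>
        rw [hps] at ih
        cases t with
        | nil => simp_all [List.modifyHead, PySem.Chars.join_singleton]
        | cons b t' => simp_all [List.modifyHead, PySem.Chars.join_cons_cons]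

theorem pySplit_append (x y : List Char) : pySplit (x ++ '.' :: y) = pySplit x ++ pySplit y := by
  induction x with
  | nil => simp [pySplit]
  | cons c x ih =>
    simp only [List.cons_append, pySplit, ih]
    split
    · simp
    · cases hps : pySplit x with
      | nil => exact absurd hps (pySplit_ne_nil x)
      | cons a t => simp [List.modifyHead]

theorem join_append (xs ys : List (List Char)) (hx : xs ≠ []) (hy : ys ≠ []) :
    PySem.Chars.join ['.'] (xs ++ ys) = PySem.Chars.join ['.'] xs ++ '.' :: PySem.Chars.join ['.'] ys := by
  induction xs with
  | nil => exact absurd rfl hx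
  | cons a xs ih =>
    cases xs with
    | nil =>
      cases ys with
      | nil => exact absurd rfl hy
      | cons b ys => simp [PySem.Chars.join_singleton, PySem.Chars.join_cons_cons]
    | cons a' xs' =>
      rw [List.cons_append, List.cons_append] at *
      rw [PySem.Chars.join_cons_cons, PySem.Chars.join_cons_cons, ih (by simp)]
      simp

theorem go_spec (as bs : List (List Char)) :
    subalternativeGo as bs =
      if as <+: bs then some (PySem.Chars.join ['.'] (bs.drop as.length))
      else if bs <+: as then some [] else none := by
  induction as generalizing bs with
  | nil => simp [subalternativeGo]
  | cons a as ih =>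
    cases bs with
    | nil => simp [subalternativeGo, PySem.Chars.join_nil]
    | cons b bs =>
      simp only [subalternativeGo]
      by_cases hab : a = b
      · subst hab
        rw [if_pos rfl, ih bs]
        simp [List.cons_prefix_cons]
      · simp [List.cons_prefix_cons, hab, Ne.symm hab]

theorem prefix_pySplit (x y : List Char) (hpre : pySplit x <+: pySplit y) (hne : x ≠ y) :
    PySem.Chars.startswith y (x ++ ['.']) = true := by
  obtain ⟨t, ht⟩ := hpre
  cases t with
  | nil =>
    rw [List.append_nil] at ht
    exact absurd (by rw [← join_pySplit x, ← join_pySplit y, ht]) hne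
  | cons h t' =>
    rw [PySem.Chars.startswith_iff]
    have hy : y = x ++ '.' :: PySem.Chars.join ['.'] (h :: t') := by
      rw [← join_pySplit y, ← ht, join_append _ _ (pySplit_ne_nil x) (by simp), join_pySplit]
    rw [hy, show x ++ '.' :: PySem.Chars.join ['.'] (h :: t')
          = (x ++ ['.']) ++ PySem.Chars.join ['.'] (h :: t') by simp]
    exact List.prefix_append _ _

theorem leftover_eq (key alt : List Char) : subalternativeA key alt = leftoverB key alt := by
  unfold subalternativeA leftoverB
  rw [splitOn_eq, splitOn_eq, go_spec]
  by_cases heq : key = alt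
  · subst heq
    simp
  · rw [if_neg heq]
    by_cases h1 : PySem.Chars.startswith alt (key ++ ['.']) = true
    · rw [if_pos h1]
      obtain ⟨rest, hrest⟩ := (PySem.Chars.startswith_iff _ _).mp h1
      have halt : alt = key ++ '.' :: rest := by
        rw [← hrest]; simp
      rw [halt, pySplit_append, if_pos (List.prefix_append _ _), List.drop_left, join_pySplit,
        show key ++ '.' :: rest = (key ++ ['.']) ++ rest from by simp,
        show key.length + 1 = (key ++ ['.']).length from by simp, List.drop_left]
    · rw [if_neg h1]
      by_cases h2 : PySem.Chars.startswith key (alt ++ ['.']) = true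
      · rw [if_pos h2]
        obtain ⟨rest, hrest⟩ := (PySem.Chars.startswith_iff _ _).mp h2
        have hkey : key = alt ++ '.' :: rest := by
          rw [← hrest]; simp
        rw [hkey, pySplit_append]
        rw [if_neg ?hnp, if_pos (List.prefix_append _ _)]
        case hnp =>
          intro hpre
          have hlen := hpre.length_le
          have hr := pySplit_ne_nil rest
          simp only [List.length_append] at hlen
          cases hps : pySplit rest with
          | nil => exact hr hps
          | cons a t => rw [hps] at hlen; simp at hlen
      · rw [if_neg h2, if_neg, if_neg]
        · intro hpre
          exact h2 (prefix_pySplit alt key hpre (Ne.symm heq))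
        · intro hpre
          exact h1 (prefix_pySplit key alt hpre heq)

theorem collectA_eq (key : List Char) (acc : List (List Char)) (xs : List (List Char)) :
    collectA key acc xs = acc ++ xs.filterMap (leftoverB key) := by
  induction xs generalizing acc with
  | nil => simp [collectA]
  | cons alt rest ih =>
    simp only [collectA, leftover_eq key alt, List.filterMap_cons]
    cases leftoverB key alt <;> simp [ih]

-- ===== VERDICT (by name: the statement is the Claim_ definition above) =====
theorem subalternatives_spec : Claim_equal_subalternatives := by
  intro key alts _ _
  unfold Spec_subalternatives subalternatives subalternatives_alt
  rw [collectA_eq, List.nil_append]
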